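-- pv_equiv track=rewrite | github.com/XxXaurora0821/Beat_the_odds | backend/ai_advisor.py | _seats_in_order_after
-- ===== SOURCE A (Python) =====
-- def _seats_in_order_after(all_seats: list[int], after_seat: int) -> list[int]:
--     seats = sorted(all_seats)
--     idx = None
--     for i, seat in enumerate(seats):
--         if seat > after_seat:
--             idx = i
--             break
--     if idx is None:
--         return seats
--     return seats[idx:] + seats[:idx]
-- ===== SOURCE B (Python) =====
-- def _seats_in_order_after(all_seats: list[int], after_seat: int) -> list[int]:
--     greater = sorted(s for s in all_seats if s > after_seat)
--     rest = sorted(s for s in all_seats if s <= after_seat)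
--     return greater + rest
-- ===== Notes on version B (the rewrite author's own statement) =====
-- stated objective: simpler
-- what changed: B partitions the seats by the strict comparison with after_seat and sorts each part, concatenating greater-then-rest, instead of sorting once and then scanning with enumerate for the rotation point and splicing two slices.
import Mathlib
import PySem

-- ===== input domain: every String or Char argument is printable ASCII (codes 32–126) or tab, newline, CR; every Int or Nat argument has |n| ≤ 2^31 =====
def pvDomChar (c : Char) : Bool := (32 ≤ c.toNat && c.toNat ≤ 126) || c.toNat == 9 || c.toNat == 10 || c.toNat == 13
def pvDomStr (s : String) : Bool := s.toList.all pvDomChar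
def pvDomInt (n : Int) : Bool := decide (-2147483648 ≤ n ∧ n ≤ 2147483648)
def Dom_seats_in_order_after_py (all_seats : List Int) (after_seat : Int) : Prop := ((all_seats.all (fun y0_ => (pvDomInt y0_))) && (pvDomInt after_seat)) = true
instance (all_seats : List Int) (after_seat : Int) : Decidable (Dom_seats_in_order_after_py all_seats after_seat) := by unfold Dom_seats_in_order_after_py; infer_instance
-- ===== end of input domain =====

-- B partitions by the strict comparison and sorts each part instead of sorting once
-- and rotating at the first greater element; objective: simpler.

-- ===== PORT A =====
-- the 'for i, seat in enumerate(seats): if seat > after_seat: idx = i; break' loop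
def pvFindA (after_seat : Int) : List (Int × Int) → Option Int
  | [] => none
  | (i, seat) :: rest => if after_seat < seat then some i else pvFindA after_seat rest

-- body after 'seats = sorted(all_seats)': the loop, the None test, and the two slices
def pvBody (seats : List Int) (after_seat : Int) : List Int :=
  match pvFindA after_seat (PySem.List.enumerate seats 0) with
  | none => seats
  | some idx => PySem.List.slice seats (some idx) none ++ PySem.List.slice seats none (some idx)

def seats_in_order_after_py (all_seats : List Int) (after_seat : Int) : List Int :=
  pvBody (PySem.List.sorted all_seats (fun x => x) false) after_seat

-- ===== PORT B =====
def seats_in_order_after_py_alt (all_seats : List Int) (after_seat : Int) : List Int :=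
  PySem.List.sorted (all_seats.filter (fun s => decide (after_seat < s))) (fun x => x) false
    ++ PySem.List.sorted (all_seats.filter (fun s => decide (s ≤ after_seat))) (fun x => x) false

-- ===== PRECONDITION & SPEC =====
def Spec_seats_in_order_after_py (all_seats : List Int) (after_seat : Int) (out : List Int) : Prop := out = seats_in_order_after_py_alt all_seats after_seat
instance (all_seats : List Int) (after_seat : Int) (out : List Int) : Decidable (Spec_seats_in_order_after_py all_seats after_seat out) := by unfold Spec_seats_in_order_after_py; infer_instance

-- ===== CLAIM (what is proved, stated in full; the proofs are below) =====
def Claim_equal_seats_in_order_after_py : Prop := ∀ (all_seats : List Int) (after_seat : Int), Dom_seats_in_order_after_py all_seats after_seat → Spec_seats_in_order_after_py all_seats after_seat (seats_in_order_after_py all_seats after_seat)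

-- ===== LEMMAS AND PROOFS =====

-- the enumerate loop returns the first index whose seat exceeds after_seat
theorem pvFindA_enumerate (a : Int) (s : List Int) : ∀ (k : Nat),
    pvFindA a (PySem.List.enumerate s (k : Int)) =
      (s.findIdx? (fun x => decide (a < x))).map (fun i => ((k + i : Nat) : Int)) := by
  induction s with
  | nil => intro k; simp [pvFindA, PySem.List.enumerate_nil]
  | cons x t ih =>
    intro k
    rw [PySem.List.enumerate_cons]
    by_cases hx : a < x
    · simp [pvFindA, hx, List.findIdx?_cons]
    · have h1 : (k : Int) + 1 = ((k + 1 : Nat) : Int) := by push_cast; ring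
      rw [pvFindA]
      simp only [hx, h1, ih (k + 1), List.findIdx?_cons]
      simp only [decide_eq_true_eq, if_neg]
      cases t.findIdx? (fun x => decide (a < x)) <;> simp; omega

theorem pvDropTake (a : Int) : ∀ (s : List Int), s.Pairwise (fun x y => x ≤ y) →
    ∀ i, s.findIdx? (fun x => decide (a < x)) = some i →
      s.drop i = s.filter (fun x => decide (a < x)) ∧
      s.take i = s.filter (fun x => decide (x ≤ a)) := by
  intro s
  induction s with
  | nil => intro _ i h; simp at h
  | cons x t ih =>
    intro hp i hfi
    have hpt : t.Pairwise (fun x y => x ≤ y) := hp.of_cons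
    have hall : ∀ y ∈ t, x ≤ y := fun y hy => List.rel_of_pairwise_cons hp hy
    by_cases hx : a < x
    · simp [List.findIdx?_cons, hx] at hfi
      subst hfi
      constructor
      · simp only [List.drop_zero, List.filter_cons, decide_eq_true_eq, hx, if_pos]
        have : t.filter (fun y => decide (a < y)) = t :=
          List.filter_eq_self.mpr (fun y hy => by
            simp only [decide_eq_true_eq]; exact lt_of_lt_of_le hx (hall y hy))
        simp [this]
      · simp only [List.take_zero, List.filter_cons]
        have hxa : ¬ x ≤ a := not_le.mpr hx
        have : t.filter (fun y => decide (y ≤ a)) = [] :=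
          List.filter_eq_nil_iff.mpr (fun y hy => by
            simp only [decide_eq_true_eq]
            exact not_le.mpr (lt_of_lt_of_le hx (hall y hy)))
        simp [hxa, this]
    · rw [List.findIdx?_cons] at hfi
      cases hj : t.findIdx? (fun x => decide (a < x)) with
      | none => simp [hx, hj] at hfi
      | some j =>
      simp only [hx, hj, decide_eq_true_eq, if_neg, not_false_iff, Option.map_some,
        Option.some_inj] at hfi
      obtain ⟨hd, ht⟩ := ih hpt j hj
      have hxa : x ≤ a := not_lt.mp hx
      subst hfi
      constructor
      · simpa [List.filter_cons, hx] using hd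
      · simp [hxa, ht]

theorem pvFilterNone (a : Int) (s : List Int)
    (h : s.findIdx? (fun x => decide (a < x)) = none) :
    s.filter (fun x => decide (x ≤ a)) = s ∧ s.filter (fun x => decide (a < x)) = [] := by
  have hall : ∀ x ∈ s, ¬ a < x := by
    intro x hx
    have := List.findIdx?_eq_none_iff.mp h x hx
    simpa using this
  constructor
  · exact List.filter_eq_self.mpr (fun x hx => by
      simp only [decide_eq_true_eq]; exact not_lt.mp (hall x hx))
  · exact List.filter_eq_nil_iff.mpr (fun x hx => by
      simp only [decide_eq_true_eq]; exact hall x hx)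

-- sorting a filtered list equals filtering the sorted list (identity key)
theorem pvSortedFilter (p : Int → Bool) (xs : List Int) :
    PySem.List.sorted (xs.filter p) (fun x => x) false =
      (PySem.List.sorted xs (fun x => x) false).filter p := by
  apply PySem.List.sorted_id_eq_of_perm_of_pairwise
  · exact (PySem.List.sorted_perm xs (fun x => x) false).filter p
  · exact List.Pairwise.sublist (List.filter_sublist) (PySem.List.sorted_pairwise xs (fun x => x))

-- ===== VERDICT (by name: the statement is the Claim_ definition above) =====
theorem seats_in_order_after_py_spec : Claim_equal_seats_in_order_after_py := by
  intro all_seats a _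
  unfold Spec_seats_in_order_after_py seats_in_order_after_py seats_in_order_after_py_alt pvBody
  set s := PySem.List.sorted all_seats (fun x => x) false with hs
  have hp : s.Pairwise (fun x y => x ≤ y) := PySem.List.sorted_pairwise all_seats (fun x => x)
  rw [pvSortedFilter, pvSortedFilter, ← hs]
  have henum : PySem.List.enumerate s (0 : Int) = PySem.List.enumerate s ((0 : Nat) : Int) := by norm_num
  rw [henum, pvFindA_enumerate]
  cases hfi : s.findIdx? (fun x => decide (a < x)) with
  | none =>
    obtain ⟨h1, h2⟩ := pvFilterNone a s hfi
    simp [h1, h2]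
  | some i =>
    obtain ⟨hd, ht⟩ := pvDropTake a s hp i hfi
    simp only [Option.map_some, Nat.zero_add]
    rw [PySem.List.slice_from_natCast, PySem.List.slice_to_natCast, hd, ht]
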